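-- pv_equiv track=rewrite | github.com/MaterializeInc/materialize | misc/python/materialize/util.py | filter_cmd
-- ===== SOURCE A (Python) =====
-- FILTERED_ARGS = [
--     # Secrets
--     "mzp_",
--     "-----BEGIN PRIVATE KEY-----",
--     "-----BEGIN CERTIFICATE-----",
--     "confluent-api-key=",
--     "confluent-api-secret=",
--     "aws-access-key-id=",
--     "aws-secret-access-key=",
--     # Not a secret, but too spammy, filter too
--     "CLUSTER_REPLICA_SIZES",
--     "cluster-replica-sizes=",
-- ]
--
-- def filter_cmd(args: list[str]) -> list[str]:
--     """Don't print out secrets in test logs"""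
--     return [
--         (
--             "[REDACTED]"
--             if any(filtered_arg in arg for filtered_arg in FILTERED_ARGS)
--             else arg
--         )
--         for arg in args
--     ]
-- ===== SOURCE B (Python) =====
-- FILTERED_ARGS = [
--     # Secrets
--     "mzp_",
--     "-----BEGIN PRIVATE KEY-----",
--     "-----BEGIN CERTIFICATE-----",
--     "confluent-api-key=",
--     "confluent-api-secret=",
--     "aws-access-key-id=",
--     "aws-secret-access-key=",
--     # Not a secret, but too spammy, filter too
--     "CLUSTER_REPLICA_SIZES",
--     "cluster-replica-sizes=",
-- ]
--
--
-- def _hit(arg: str) -> bool: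
--     # single left-to-right scan: at each position, does some forbidden string start here?
--     for i in range(len(arg)):
--         for f in FILTERED_ARGS:
--             if arg.startswith(f, i):
--                 return True
--     return False
--
--
-- def filter_cmd(args: list[str]) -> list[str]:
--     """Don't print out secrets in test logs"""
--     out = []
--     for arg in args:
--         out.append("[REDACTED]" if _hit(arg) else arg)
--     return out
-- ===== Notes on version B (the rewrite author's own statement) =====
-- stated objective: alternative
-- what changed: Replaces the per-arg 'any(f in arg)' battery of k independent substring searches by one explicit left-to-right position scan that checks at each offset whether some forbidden string starts there (startswith), with an accumulator loop instead of a comprehension.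
import Mathlib
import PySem

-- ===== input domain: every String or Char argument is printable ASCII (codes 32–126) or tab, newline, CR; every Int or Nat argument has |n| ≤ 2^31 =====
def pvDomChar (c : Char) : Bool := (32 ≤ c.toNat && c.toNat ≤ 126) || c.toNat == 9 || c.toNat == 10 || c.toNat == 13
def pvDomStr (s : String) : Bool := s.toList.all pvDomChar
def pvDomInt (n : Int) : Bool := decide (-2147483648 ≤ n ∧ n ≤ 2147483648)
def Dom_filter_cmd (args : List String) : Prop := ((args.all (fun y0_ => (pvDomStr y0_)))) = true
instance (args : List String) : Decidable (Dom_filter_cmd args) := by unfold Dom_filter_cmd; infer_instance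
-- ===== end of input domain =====

-- B replaces the per-arg 'any(f in arg)' battery of substring searches by one explicit
-- position scan using startswith, with an accumulator loop (alternative decomposition).

-- the shared module constant FILTERED_ARGS
def FILTERED_ARGS : List String :=
  [ "mzp_",
    "-----BEGIN PRIVATE KEY-----",
    "-----BEGIN CERTIFICATE-----",
    "confluent-api-key=",
    "confluent-api-secret=",
    "aws-access-key-id=",
    "aws-secret-access-key=",
    "CLUSTER_REPLICA_SIZES",
    "cluster-replica-sizes=" ]

-- ===== PORT A =====
-- list comprehension with 'any(filtered_arg in arg for filtered_arg in FILTERED_ARGS)'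
def filter_cmd (args : List String) : List String :=
  args.map (fun arg =>
    if FILTERED_ARGS.any (fun filtered_arg => PySem.Str.isIn filtered_arg arg)
    then "[REDACTED]" else arg)

-- ===== PORT B =====
-- _hit: for i in range(len(arg)): for f in FILTERED_ARGS: if arg.startswith(f, i): return True
-- ported as structural recursion over the suffixes of the char list (one step per position i)
def pvHit : List Char → Bool
  | [] => false
  | c :: rest =>
    if FILTERED_ARGS.any (fun f => f.toList.isPrefixOf (c :: rest)) then true
    else pvHit rest

-- accumulator loop: out = []; for arg in args: out.append(...)
def filter_cmd_alt (args : List String) : List String :=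
  args.foldl (fun out arg =>
    out ++ [if pvHit arg.toList then "[REDACTED]" else arg]) []

-- ===== PRECONDITION & SPEC =====
def Spec_filter_cmd (args : List String) (out : List String) : Prop := out = filter_cmd_alt args
instance (args : List String) (out : List String) : Decidable (Spec_filter_cmd args out) := by unfold Spec_filter_cmd; infer_instance

-- ===== CLAIM (what is proved, stated in full; the proofs are below) =====
def Claim_equal_filter_cmd : Prop := ∀ (args : List String), Dom_filter_cmd args → Spec_filter_cmd args (filter_cmd args)

-- ===== LEMMAS AND PROOFS =====

-- the accumulator-append loop is the map
theorem pv_foldl_append_map (l : List String) (g : String → String) (acc : List String) :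
    l.foldl (fun out arg => out ++ [g arg]) acc = acc ++ l.map g := by
  induction l generalizing acc with
  | nil => simp
  | cons a t ih => simp [List.foldl_cons, ih, List.append_assoc]

-- the position scan finds exactly the infix occurrences (all patterns are nonempty)
theorem pvHit_iff (cs : List Char) (h : ∀ f ∈ FILTERED_ARGS, f.toList ≠ []) :
    pvHit cs = true ↔ ∃ f ∈ FILTERED_ARGS, f.toList <:+: cs := by
  induction cs with
  | nil =>
    simp only [pvHit, Bool.false_eq_true, false_iff]
    rintro ⟨f, hf, hinf⟩
    exact h f hf (List.eq_nil_of_infix_nil hinf)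
  | cons c rest ih =>
    simp only [pvHit]
    split_ifs with hp
    · simp only [true_iff]
      rcases List.any_eq_true.mp hp with ⟨f, hf, hpre⟩
      exact ⟨f, hf, (List.IsPrefix.isInfix (List.isPrefixOf_iff_prefix.mp hpre))⟩
    · rw [ih]
      constructor
      · rintro ⟨f, hf, hinf⟩
        exact ⟨f, hf, hinf.trans (List.suffix_cons c rest).isInfix⟩
      · rintro ⟨f, hf, hinf⟩
        rcases List.infix_cons_iff.mp hinf with hpre | hinf'
        · exact absurd (List.any_eq_true.mpr ⟨f, hf, List.isPrefixOf_iff_prefix.mpr hpre⟩) hp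
        · exact ⟨f, hf, hinf'⟩

theorem pv_nonempty : ∀ f ∈ FILTERED_ARGS, f.toList ≠ [] := by decide

theorem pvHit_eq_any (arg : String) :
    pvHit arg.toList = FILTERED_ARGS.any (fun f => PySem.Str.isIn f arg) := by
  apply Bool.eq_iff_iff.mpr
  rw [pvHit_iff arg.toList pv_nonempty, List.any_eq_true]
  exact ⟨fun ⟨f, hf, hi⟩ => ⟨f, hf, (PySem.Str.isIn_iff_infix f arg).mpr hi⟩,
         fun ⟨f, hf, hi⟩ => ⟨f, hf, (PySem.Str.isIn_iff_infix f arg).mp hi⟩⟩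

-- ===== VERDICT (by name: the statement is the Claim_ definition above) =====
theorem filter_cmd_spec : Claim_equal_filter_cmd := by
  intro args _
  unfold Spec_filter_cmd filter_cmd filter_cmd_alt
  rw [pv_foldl_append_map, List.nil_append]
  exact (List.map_congr_left (fun arg _ => by rw [pvHit_eq_any])).symm
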